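-- pv_equiv track=rewrite | github.com/elmuz/Advent-of-Code | 1/aoc-1-1.py | get_code_from_line
-- ===== SOURCE A (Python) =====
-- from typing import Optional
--
-- digit_map = {
--     "0": 0,
--     "1": 1,
--     "2": 2,
--     "3": 3,
--     "4": 4,
--     "5": 5,
--     "6": 6,
--     "7": 7,
--     "8": 8,
--     "9": 9,
-- }
--
-- def isint(char: str) -> Optional[int]:
--     return digit_map.get(char)
--
-- def get_code_from_line(line: str) -> int:
--     idx = 0
--     idx_2 = len(line) - 1
--     left = None
--     right = None
--     while idx < len(line):
--         num = isint(line[idx])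
--         if num is not None:
--             left = num
--             break
--         idx += 1
--     while idx_2 > idx:
--         num = isint(line[idx_2])
--         if num is not None:
--             right = num
--             break
--         idx_2 -= 1
--     if right is None:
--         right = left
--     return left * 10 + right
-- ===== SOURCE B (Python) =====
-- digit_map = {
--     "0": 0,
--     "1": 1,
--     "2": 2,
--     "3": 3,
--     "4": 4,
--     "5": 5,
--     "6": 6,
--     "7": 7,
--     "8": 8,
--     "9": 9,
-- }
--
-- def get_code_from_line(line: str) -> int:
--     digits = [digit_map[c] for c in line if c in digit_map]
--     return digits[0] * 10 + digits[-1]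
-- ===== Notes on version B (the rewrite author's own statement) =====
-- stated objective: simpler
-- what changed: Replaces A's two index-based while loops (forward scan for the first digit, backward scan guarded by idx_2 > idx with a None fallback) by one comprehension collecting all digit values, then digits[0]*10 + digits[-1].
import Mathlib
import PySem

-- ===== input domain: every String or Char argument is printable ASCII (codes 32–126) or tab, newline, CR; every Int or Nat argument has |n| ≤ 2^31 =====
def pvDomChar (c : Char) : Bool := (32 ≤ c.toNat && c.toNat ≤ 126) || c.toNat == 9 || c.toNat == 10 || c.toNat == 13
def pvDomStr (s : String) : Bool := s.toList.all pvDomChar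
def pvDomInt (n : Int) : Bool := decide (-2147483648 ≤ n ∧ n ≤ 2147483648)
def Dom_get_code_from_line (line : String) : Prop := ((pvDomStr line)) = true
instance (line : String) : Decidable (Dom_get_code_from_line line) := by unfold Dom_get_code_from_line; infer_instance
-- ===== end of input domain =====

-- B replaces A's two index-based while loops by one digit-collecting pass (first/last element);
-- objective: simpler. Equal on every line containing an ASCII digit (Pre_); elsewhere A raises TypeError.

-- ===== PORT A =====
-- module-level digit_map (shared by both Pythons)
def pvDigitMap : PySem.Dict Char Int :=
  PySem.Dict.ofList [('0', 0), ('1', 1), ('2', 2), ('3', 3), ('4', 4),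
   ('5', 5), ('6', 6), ('7', 7), ('8', 8), ('9', 9)]

-- isint(char) = digit_map.get(char)
def pvIsint (c : Char) : Option Int := PySem.Dict.get? pvDigitMap c

-- first while loop: scan forward from idx; returns (left, break index) or none (loop ran off)
def pvLoopLeft : List Char → Nat → Option (Int × Nat)
  | [], _ => none
  | c :: rest, idx =>
    match pvIsint c with
    | some n => some (n, idx)
    | none => pvLoopLeft rest (idx + 1)

-- second while loop: while idx_2 > idx, check line[idx_2], step idx_2 down
-- (cs.getD idx2 ' ' is line[idx_2]; the index is in range whenever the body runs)
def pvLoopRight (cs : List Char) (idx : Nat) : Nat → Option Int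
  | idx2 =>
    if idx2 > idx then
      match pvIsint (cs.getD idx2 ' ') with
      | some n => some n
      | none => pvLoopRight cs idx (idx2 - 1)
    else none

def get_code_from_line (line : String) : Int :=
  let cs := line.toList
  match pvLoopLeft cs 0 with
  | some (left, idx) =>
    let right0 := pvLoopRight cs idx (cs.length - 1)
    let right := match right0 with | some r => r | none => left    -- if right is None: right = left
    left * 10 + right
  | none => 0   -- left is None: Python raises TypeError; excluded by Pre_

-- ===== PORT B =====
def get_code_from_line_alt (line : String) : Int :=
  let digits := line.toList.filterMap pvIsint    -- [digit_map[c] for c in line if c in digit_map]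
  match PySem.List.pyGet? digits 0, PySem.List.pyGet? digits (-1) with
  | some l, some r => l * 10 + r
  | _, _ => 0   -- digits empty: Python raises IndexError; excluded by Pre_

-- ===== PRECONDITION & SPEC =====
-- Pre_ excludes lines with no ASCII digit: there A raises TypeError (None * 10) and B raises IndexError.
def Pre_get_code_from_line (line : String) : Prop :=
  (line.toList.any (fun c => 48 ≤ c.toNat && c.toNat ≤ 57)) = true
instance (line : String) : Decidable (Pre_get_code_from_line line) := by
  unfold Pre_get_code_from_line; infer_instance
def pvWitness_get_code_from_line : String := "1"

def Spec_get_code_from_line (line : String) (out : Int) : Prop := out = get_code_from_line_alt line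
instance (line : String) (out : Int) : Decidable (Spec_get_code_from_line line out) := by unfold Spec_get_code_from_line; infer_instance

-- ===== CLAIM (what is proved, stated in full; the proofs are below) =====
def Claim_equal_get_code_from_line : Prop := ∀ (line : String), Dom_get_code_from_line line → Pre_get_code_from_line line → Spec_get_code_from_line line (get_code_from_line line)

-- ===== LEMMAS AND PROOFS =====

lemma pvCharEq {c d : Char} (h : c.toNat = d.toNat) : c = d :=
  Char.ext (UInt32.toNat_inj.mp h)

lemma pvIsint_isSome_iff (c : Char) : (pvIsint c).isSome = true ↔ ('0' ≤ c ∧ c ≤ '9') := by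
  constructor
  · intro h
    simp only [pvIsint, PySem.Dict.get?, Option.isSome_map] at h
    obtain ⟨p, hp⟩ := Option.isSome_iff_exists.1 h
    have hmem := List.mem_of_find?_eq_some hp
    have hbeq := List.find?_some hp
    have hitems : pvDigitMap.items = [('0', (0:Int)), ('1', 1), ('2', 2), ('3', 3), ('4', 4),
        ('5', 5), ('6', 6), ('7', 7), ('8', 8), ('9', 9)] := by decide
    rw [hitems] at hmem
    fin_cases hmem <;> simp only [beq_iff_eq] at hbeq <;> subst hbeq <;> decide
  · intro ⟨h1, h2⟩
    have hv : 48 ≤ c.toNat ∧ c.toNat ≤ 57 := ⟨h1, h2⟩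
    have hval : c.toNat = 48 ∨ c.toNat = 49 ∨ c.toNat = 50 ∨ c.toNat = 51 ∨ c.toNat = 52 ∨
        c.toNat = 53 ∨ c.toNat = 54 ∨ c.toNat = 55 ∨ c.toNat = 56 ∨ c.toNat = 57 := by omega
    have hc : c = '0' ∨ c = '1' ∨ c = '2' ∨ c = '3' ∨ c = '4' ∨ c = '5' ∨ c = '6' ∨ c = '7' ∨ c = '8' ∨ c = '9' := by
      rcases hval with h|h|h|h|h|h|h|h|h|h
      · exact Or.inl (pvCharEq h)
      · exact Or.inr (Or.inl (pvCharEq h))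
      · exact Or.inr (Or.inr (Or.inl (pvCharEq h)))
      · exact Or.inr (Or.inr (Or.inr (Or.inl (pvCharEq h))))
      · exact Or.inr (Or.inr (Or.inr (Or.inr (Or.inl (pvCharEq h)))))
      · exact Or.inr (Or.inr (Or.inr (Or.inr (Or.inr (Or.inl (pvCharEq h))))))
      · exact Or.inr (Or.inr (Or.inr (Or.inr (Or.inr (Or.inr (Or.inl (pvCharEq h)))))))
      · exact Or.inr (Or.inr (Or.inr (Or.inr (Or.inr (Or.inr (Or.inr (Or.inl (pvCharEq h))))))))
      · exact Or.inr (Or.inr (Or.inr (Or.inr (Or.inr (Or.inr (Or.inr (Or.inr (Or.inl (pvCharEq h)))))))))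
      · exact Or.inr (Or.inr (Or.inr (Or.inr (Or.inr (Or.inr (Or.inr (Or.inr (Or.inr (pvCharEq h)))))))))
    rcases hc with h|h|h|h|h|h|h|h|h|h <;> subst h <;> decide

lemma pvLoopLeft_spec (cs : List Char) (idx : Nat) :
    (pvLoopLeft cs idx = none ∧ cs.filterMap pvIsint = []) ∨
    ∃ n j, pvLoopLeft cs idx = some (n, idx + j) ∧ j < cs.length ∧
      cs.filterMap pvIsint = n :: (cs.drop (j + 1)).filterMap pvIsint := by
  induction cs generalizing idx with
  | nil => exact Or.inl ⟨rfl, rfl⟩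
  | cons c rest ih =>
    cases hc : pvIsint c with
    | some n =>
      refine Or.inr ⟨n, 0, ?_, by simp, ?_⟩
      · simp [pvLoopLeft, hc]
      · simp [hc]
    | none =>
      rcases ih (idx + 1) with ⟨h1, h2⟩ | ⟨n, j, h1, h2, h3⟩
      · exact Or.inl ⟨by simp [pvLoopLeft, hc, h1], by simp [hc, h2]⟩
      · refine Or.inr ⟨n, j + 1, ?_, by simpa using Nat.succ_lt_succ h2, ?_⟩
        · simpa [pvLoopLeft, hc, Nat.add_assoc, Nat.add_comm 1 j] using h1
        · simpa [List.filterMap_cons, hc] using h3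

lemma pvLoopRight_spec (idx2 : Nat) (cs : List Char) (idx : Nat) (h : idx2 < cs.length) :
    pvLoopRight cs idx idx2 = (((cs.take (idx2 + 1)).drop (idx + 1)).filterMap pvIsint).getLast? := by
  induction idx2 with
  | zero =>
    rw [pvLoopRight]
    rw [if_neg (by omega : ¬ 0 > idx)]
    have : (cs.take 1).drop (idx + 1) = [] :=
      List.drop_eq_nil_of_le (Nat.le_trans (List.length_take_le 1 cs) (by omega))
    simp [this]
  | succ k ih =>
    have hk : k < cs.length := by omega
    have htake : cs.take (k + 1 + 1) = cs.take (k + 1) ++ [cs[k + 1]] := by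
      rw [List.take_add_one]
      simp [List.getElem?_eq_getElem h]
    rw [pvLoopRight]
    by_cases hgt : k + 1 > idx
    · have hlen : (cs.take (k + 1)).length = k + 1 := List.length_take_of_le (by omega)
      have hdrop : (cs.take (k + 1 + 1)).drop (idx + 1)
          = (cs.take (k + 1)).drop (idx + 1) ++ [cs[k + 1]] := by
        rw [htake, List.drop_append_of_le_length (by omega)]
      have hgetD : cs.getD (k + 1) ' ' = cs[k + 1] := by
        simp [List.getD_eq_getElem?_getD, List.getElem?_eq_getElem h]
      rw [if_pos hgt, hgetD, hdrop, List.filterMap_append]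
      cases hc : pvIsint cs[k + 1] with
      | some n => simp [hc]
      | none =>
        simp only [List.filterMap_cons, hc, List.filterMap_nil, List.append_nil]
        simpa using ih hk
    · rw [if_neg hgt]
      have : (cs.take (k + 1 + 1)).drop (idx + 1) = [] :=
        List.drop_eq_nil_of_le (le_trans (List.length_take_le _ cs) (by omega))
      simp [this]

lemma pre_filterMap_ne_nil {line : String} (h : Pre_get_code_from_line line) :
    line.toList.filterMap pvIsint ≠ [] := by
  obtain ⟨c, hmem, hd⟩ := List.any_eq_true.mp h
  simp only [Bool.and_eq_true, decide_eq_true_eq] at hd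
  intro hnil
  have hs : (pvIsint c).isSome = true := (pvIsint_isSome_iff c).2 ⟨hd.1, hd.2⟩
  obtain ⟨n, hn⟩ := Option.isSome_iff_exists.1 hs
  have : n ∈ line.toList.filterMap pvIsint := List.mem_filterMap.2 ⟨c, hmem, hn⟩
  simp [hnil] at this

-- ===== VERDICT (by name: the statement is the Claim_ definition above) =====
theorem get_code_from_line_spec : Claim_equal_get_code_from_line := by
  intro line _ hpre
  have hne : line.toList.filterMap pvIsint ≠ [] := pre_filterMap_ne_nil hpre
  unfold Spec_get_code_from_line get_code_from_line get_code_from_line_alt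
  rcases pvLoopLeft_spec line.toList 0 with ⟨_, h2⟩ | ⟨n, j, h1, h2, h3⟩
  · exact absurd h2 hne
  · simp only [Nat.zero_add] at h1
    have hlen : line.toList.length - 1 < line.toList.length := by omega
    have hR := pvLoopRight_spec (line.toList.length - 1) line.toList j hlen
    rw [Nat.sub_add_cancel (by omega), List.take_length] at hR
    simp only [h1, h3, hR, PySem.List.pyGet?_neg_one]
    cases hT : (List.filterMap pvIsint (List.drop (j + 1) line.toList)).getLast? with
    | none =>
      have hTnil := List.getLast?_eq_none_iff.mp hT
      simp [hTnil, PySem.List.pyGet?, PySem.List.pyIdx?]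
    | some r =>
      simp [hT, List.getLast?_cons, PySem.List.pyGet?, PySem.List.pyIdx?]
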